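-- pv_equiv track=rewrite | github.com/makakris/Hacker_rank-sols | dayOfProgrammer.py | dayOfProgrammer
-- ===== SOURCE A (Python) =====
-- def dayOfProgrammer(year):
--     summ=0
--     days=[31,28,31,30,31,30,31,31,30,31,30,31]
--     if year==1918:
--         days[1]=days[1]-13
--     elif year<=1917 and year>=1700:
--         if year%4==0:
--             days[1]=29
--         else:
--             days[1]=28
--     elif year>1918 and year<=2700:
--         if year%400 == 0 or (year %4 ==0 and year%100 != 0):
--             days[1]=29
--         else:
--             days[1]=28
--     for i in range(len(days)):
--         summ=summ+days[i]
--         if summ > 256: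
--             date=256-a
--             return ("{}.0{}.{}".format(date,i+1,year))
--         a=summ
-- ===== SOURCE B (Python) =====
-- def dayOfProgrammer(year):
--     if year == 1918:
--         day = 26
--     else:
--         if 1700 <= year <= 1917:
--             leap = year % 4 == 0
--         elif 1918 < year <= 2700:
--             leap = year % 400 == 0 or (year % 4 == 0 and year % 100 != 0)
--         else:
--             leap = False
--         day = 12 if leap else 13
--     return "{}.09.{}".format(day, year)
-- ===== Notes on version B (the rewrite author's own statement) =====
-- stated objective: simpler
-- what changed: Replaces the months array, in-place February mutation and running-sum loop with a closed form: decide leapness per year regime and return the fixed September day directly.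
import Mathlib
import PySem

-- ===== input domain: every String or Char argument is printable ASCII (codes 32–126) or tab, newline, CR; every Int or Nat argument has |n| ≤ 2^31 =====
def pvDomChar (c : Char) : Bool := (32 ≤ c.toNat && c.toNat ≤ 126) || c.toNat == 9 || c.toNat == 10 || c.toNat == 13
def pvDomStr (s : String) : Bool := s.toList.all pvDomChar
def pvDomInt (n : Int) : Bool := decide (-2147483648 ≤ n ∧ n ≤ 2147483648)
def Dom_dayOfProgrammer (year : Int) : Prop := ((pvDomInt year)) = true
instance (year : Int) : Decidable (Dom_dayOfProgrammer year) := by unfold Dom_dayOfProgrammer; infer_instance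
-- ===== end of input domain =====

-- B replaces A's months array and running-sum loop by a closed-form September day (simpler; same O(1) cost).

-- ===== PORT A =====
-- for i in range(len(days)): …  — structural recursion over the remaining days with index i,
-- state (summ, a); returns none when the loop falls off the end (Python would return None,
-- which never happens: the total of days always exceeds 256).
def dopLoop (year : Int) : List Int → Int → Int → Int → Option String
  | [], _, _, _ => none
  | d :: rest, i, summ, a =>
    let summ' := summ + d
    if summ' > 256 then
      let date := 256 - a
      some (PySem.Int.toStr date ++ ".0" ++ PySem.Int.toStr (i + 1) ++ "." ++ PySem.Int.toStr year)
    else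
      dopLoop year rest (i + 1) summ' summ'

def dayOfProgrammer (year : Int) : String :=
  let days : List Int := [31, 28, 31, 30, 31, 30, 31, 31, 30, 31, 30, 31]
  let days :=
    if year == 1918 then days.set 1 (28 - 13)
    else if year ≤ 1917 ∧ year ≥ 1700 then
      if PySem.Int.mod year 4 = 0 then days.set 1 29 else days.set 1 28
    else if year > 1918 ∧ year ≤ 2700 then
      if PySem.Int.mod year 400 = 0 ∨ (PySem.Int.mod year 4 = 0 ∧ PySem.Int.mod year 100 ≠ 0)
      then days.set 1 29 else days.set 1 28
    else days
  -- the loop always returns before the list is exhausted; "" stands for the unreachable fall-through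
  (dopLoop year days 0 0 0).getD ""

-- ===== PORT B =====
def dayOfProgrammer_alt (year : Int) : String :=
  let day : Int :=
    if year == 1918 then 26
    else
      let leap :=
        if 1700 ≤ year ∧ year ≤ 1917 then PySem.Int.mod year 4 = 0
        else if 1918 < year ∧ year ≤ 2700 then
          PySem.Int.mod year 400 = 0 ∨ (PySem.Int.mod year 4 = 0 ∧ PySem.Int.mod year 100 ≠ 0)
        else False
      if leap then 12 else 13
  PySem.Int.toStr day ++ ".09." ++ PySem.Int.toStr year

-- ===== PRECONDITION & SPEC =====
def Spec_dayOfProgrammer (year : Int) (out : String) : Prop := out = dayOfProgrammer_alt year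
instance (year : Int) (out : String) : Decidable (Spec_dayOfProgrammer year out) := by unfold Spec_dayOfProgrammer; infer_instance

-- ===== CLAIM (what is proved, stated in full; the proofs are below) =====
def Claim_equal_dayOfProgrammer : Prop := ∀ (year : Int), Dom_dayOfProgrammer year → Spec_dayOfProgrammer year (dayOfProgrammer year)

-- ===== LEMMAS AND PROOFS =====
-- the loop on the concrete non-leap month list yields day 13 of month 9
theorem dopLoop_feb28 (year : Int) :
    dopLoop year [31, 28, 31, 30, 31, 30, 31, 31, 30, 31, 30, 31] 0 0 0 =
      some (PySem.Int.toStr 13 ++ ".0" ++ PySem.Int.toStr 9 ++ "." ++ PySem.Int.toStr year) := by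
  simp [dopLoop]

theorem dopLoop_feb29 (year : Int) :
    dopLoop year [31, 29, 31, 30, 31, 30, 31, 31, 30, 31, 30, 31] 0 0 0 =
      some (PySem.Int.toStr 12 ++ ".0" ++ PySem.Int.toStr 9 ++ "." ++ PySem.Int.toStr year) := by
  simp [dopLoop]

theorem dopLoop_feb15 (year : Int) :
    dopLoop year [31, 15, 31, 30, 31, 30, 31, 31, 30, 31, 30, 31] 0 0 0 =
      some (PySem.Int.toStr 26 ++ ".0" ++ PySem.Int.toStr 9 ++ "." ++ PySem.Int.toStr year) := by
  simp [dopLoop]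

-- "d" ++ ".0" ++ "9" ++ "." ++ s = "d" ++ ".09." ++ s for the three concrete day numbers
theorem fmt_eq (d : Int) (hd : d = 13 ∨ d = 12 ∨ d = 26) (s : String) :
    PySem.Int.toStr d ++ ".0" ++ PySem.Int.toStr (9 : Int) ++ "." ++ s =
      PySem.Int.toStr d ++ ".09." ++ s := by
  rcases hd with h | h | h <;> subst h <;> rfl

theorem dayOfProgrammer_spec : Claim_equal_dayOfProgrammer := by
  intro year _
  unfold Spec_dayOfProgrammer dayOfProgrammer dayOfProgrammer_alt
  by_cases h1918 : year == 1918
  · simp only [h1918, if_true]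
    rw [show ([31, 28, 31, 30, 31, 30, 31, 31, 30, 31, 30, 31] : List Int).set 1 (28 - 13) =
          [31, 15, 31, 30, 31, 30, 31, 31, 30, 31, 30, 31] from rfl, dopLoop_feb15]
    exact fmt_eq 26 (by right; right; rfl) _
  · simp only [h1918, Bool.false_eq_true, if_false]
    by_cases hjul : year ≤ 1917 ∧ year ≥ 1700
    · have hjul' : 1700 ≤ year ∧ year ≤ 1917 := ⟨hjul.2, hjul.1⟩
      rw [if_pos hjul]
      simp only [if_pos hjul']
      by_cases h4 : PySem.Int.mod year 4 = 0
      · rw [if_pos h4]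
        rw [show ([31, 28, 31, 30, 31, 30, 31, 31, 30, 31, 30, 31] : List Int).set 1 29 =
              [31, 29, 31, 30, 31, 30, 31, 31, 30, 31, 30, 31] from rfl, dopLoop_feb29]
        simp only [h4, if_true]
        exact fmt_eq 12 (by right; left; rfl) _
      · rw [if_neg h4]
        rw [show ([31, 28, 31, 30, 31, 30, 31, 31, 30, 31, 30, 31] : List Int).set 1 28 =
              [31, 28, 31, 30, 31, 30, 31, 31, 30, 31, 30, 31] from rfl, dopLoop_feb28]
        simp only [h4, if_false]
        exact fmt_eq 13 (by left; rfl) _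
    · have hjul' : ¬ (1700 ≤ year ∧ year ≤ 1917) := fun h => hjul ⟨h.2, h.1⟩
      rw [if_neg hjul]
      simp only [if_neg hjul']
      by_cases hgre : year > 1918 ∧ year ≤ 2700
      · have hgre' : 1918 < year ∧ year ≤ 2700 := hgre
        rw [if_pos hgre]
        simp only [if_pos hgre']
        by_cases hl : PySem.Int.mod year 400 = 0 ∨ (PySem.Int.mod year 4 = 0 ∧ PySem.Int.mod year 100 ≠ 0)
        · rw [if_pos hl]
          rw [show ([31, 28, 31, 30, 31, 30, 31, 31, 30, 31, 30, 31] : List Int).set 1 29 =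
                [31, 29, 31, 30, 31, 30, 31, 31, 30, 31, 30, 31] from rfl, dopLoop_feb29]
          simp only [hl, if_true]
          exact fmt_eq 12 (by right; left; rfl) _
        · rw [if_neg hl]
          rw [show ([31, 28, 31, 30, 31, 30, 31, 31, 30, 31, 30, 31] : List Int).set 1 28 =
                [31, 28, 31, 30, 31, 30, 31, 31, 30, 31, 30, 31] from rfl, dopLoop_feb28]
          simp only [hl, if_false]
          exact fmt_eq 13 (by left; rfl) _
      · rw [if_neg hgre]
        simp only [if_neg hgre]
        rw [dopLoop_feb28]
        simp only [if_false]
        exact fmt_eq 13 (by left; rfl) _
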